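-- pv_equiv track=rewrite | github.com/tal66/aoc | aoc13/aoc.py | one_row_ref
-- ===== SOURCE A (Python) =====
-- def one_row_ref(lines, i) -> bool:  # around row i
--     up = i - 1
--     down = i
--     while up >= 0 and down < len(lines):
--         if not (lines[up] == lines[down]):
--             return False
--         up -= 1
--         down += 1
--
--     return True
-- ===== SOURCE B (Python) =====
-- def one_row_ref(lines, i) -> bool:  # around row i
--     m = max(0, min(i, len(lines) - i))
--     return lines[i - m:i][::-1] == lines[i:i + m]
-- ===== Notes on version B (the rewrite author's own statement) =====
-- stated objective: simpler
-- what changed: Replaced the expanding two-pointer while loop with a closed-form reflection length m = max(0, min(i, len-i)) and a single bulk comparison of the reversed top slice against the bottom slice.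
import Mathlib
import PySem

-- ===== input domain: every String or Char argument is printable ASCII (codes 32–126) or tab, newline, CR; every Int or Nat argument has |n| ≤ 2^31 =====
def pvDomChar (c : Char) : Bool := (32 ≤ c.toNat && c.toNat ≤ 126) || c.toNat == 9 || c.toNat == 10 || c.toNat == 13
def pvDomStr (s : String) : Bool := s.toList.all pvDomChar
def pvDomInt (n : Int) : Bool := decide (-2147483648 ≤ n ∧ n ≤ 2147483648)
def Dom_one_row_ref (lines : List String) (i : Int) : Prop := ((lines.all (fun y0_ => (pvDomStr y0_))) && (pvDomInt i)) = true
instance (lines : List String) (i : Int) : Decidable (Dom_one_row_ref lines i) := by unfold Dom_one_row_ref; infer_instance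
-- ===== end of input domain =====

-- B replaces A's expanding two-pointer loop by a closed-form reflection length and one bulk slice comparison (simpler decomposition; same cost).


-- ===== PORT A =====
-- the while loop: up/down two-pointer scan with guard 'up >= 0 and down < len(lines)';
-- both indices are always in range when the guard holds, so pyGet? equality is the exact 'lines[up] == lines[down]'
def oneRowRefLoop (lines : List String) (up down : Int) : Bool :=
  if h : 0 ≤ up ∧ down < (lines.length : Int) then
    if PySem.List.pyGet? lines up = PySem.List.pyGet? lines down then
      oneRowRefLoop lines (up - 1) (down + 1)
    else false
  else true
termination_by (up + 1).toNat
decreasing_by omega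

def one_row_ref (lines : List String) (i : Int) : Bool :=
  oneRowRefLoop lines (i - 1) i

-- ===== PORT B =====
-- m = max(0, min(i, len(lines) - i)); return lines[i-m:i][::-1] == lines[i:i+m]
-- ([::-1] ported as .reverse, exact per PySem.List.slice?_none_none_neg_one)
def one_row_ref_alt (lines : List String) (i : Int) : Bool :=
  let m : Int := max 0 (min i ((lines.length : Int) - i))
  (PySem.List.slice lines (some (i - m)) (some i)).reverse == PySem.List.slice lines (some i) (some (i + m))

-- ===== PRECONDITION & SPEC =====
def Spec_one_row_ref (lines : List String) (i : Int) (out : Bool) : Prop := out = one_row_ref_alt lines i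
instance (lines : List String) (i : Int) (out : Bool) : Decidable (Spec_one_row_ref lines i out) := by unfold Spec_one_row_ref; infer_instance

-- ===== CLAIM (what is proved, stated in full; the proofs are below) =====
def Claim_equal_one_row_ref : Prop := ∀ (lines : List String) (i : Int), Dom_one_row_ref lines i → Spec_one_row_ref lines i (one_row_ref lines i)

-- ===== LEMMAS AND PROOFS =====

-- A's loop decided pointwise: true iff every mirrored pair inside the array bounds agrees
theorem oneRowRefLoop_iff (lines : List String) (up down : Int) :
    oneRowRefLoop lines up down = true ↔
      ∀ k : Nat, (k : Int) ≤ up → down + k < (lines.length : Int) →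
        PySem.List.pyGet? lines (up - k) = PySem.List.pyGet? lines (down + k) := by
  fun_induction oneRowRefLoop lines up down with
  | case1 up down h heq ih =>
    rw [ih]
    constructor
    · intro H k hk1 hk2
      cases k with
      | zero => simpa using heq
      | succ j =>
        have := H j (by push_cast at hk1; omega) (by push_cast at hk2 ⊢; omega)
        have e1 : up - 1 - (j:Int) = up - ((j+1 : Nat):Int) := by push_cast; ring
        have e2 : down + 1 + (j:Int) = down + ((j+1 : Nat):Int) := by push_cast; ring
        rw [e1, e2] at this; exact this
    · intro H j hj1 hj2
      have := H (j+1) (by push_cast; omega) (by push_cast at hj2 ⊢; omega)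
      have e1 : up - ((j+1 : Nat):Int) = up - 1 - (j:Int) := by push_cast; ring
      have e2 : down + ((j+1 : Nat):Int) = down + 1 + (j:Int) := by push_cast; ring
      rw [e1, e2] at this; exact this
  | case2 up down h heq =>
    simp only [Bool.false_eq_true, false_iff, not_forall]
    exact ⟨0, by simpa using h.1, by simpa using h.2, by simpa using heq⟩
  | case3 up down h =>
    simp only [true_iff]
    intro k hk1 hk2
    exfalso
    omega
-- B's bulk slice comparison decided pointwise: the same mirrored-pair condition at up = i-1, down = i
theorem alt_iff (lines : List String) (i : Int) :
    one_row_ref_alt lines i = true ↔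
      ∀ k : Nat, (k : Int) ≤ i - 1 → i + k < (lines.length : Int) →
        PySem.List.pyGet? lines (i - 1 - k) = PySem.List.pyGet? lines (i + k) := by
  unfold one_row_ref_alt
  simp only [beq_iff_eq]
  by_cases hi : 0 < i ∧ i < (lines.length : Int)
  · obtain ⟨hi0, hin⟩ := hi
    have hm : max 0 (min i ((lines.length : Int) - i)) = min i ((lines.length : Int) - i) := by omega
    rw [hm]
    set m : Int := min i ((lines.length : Int) - i) with hmdef
    have hm0 : 0 < m := by omega
    have hmi : m ≤ i := by omega
    have hmn : i + m ≤ (lines.length : Int) := by omega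
    rw [PySem.List.slice_toNat _ (by omega) (by omega),
        PySem.List.slice_toNat _ (by omega) (by omega)]
    set L1 : List String := (lines.drop (i - m).toNat).take (i.toNat - (i - m).toNat) with hL1def
    set L2 : List String := (lines.drop i.toNat).take ((i + m).toNat - i.toNat) with hL2def
    have hlen1 : L1.length = m.toNat := by
      rw [hL1def]; simp only [List.length_take, List.length_drop]; omega
    have hlen2 : L2.length = m.toNat := by
      rw [hL2def]; simp only [List.length_take, List.length_drop]; omega
    have eq1 : ∀ k : Nat, k < m.toNat → L1.reverse[k]? = lines[i.toNat - 1 - k]? := by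
      intro k hk
      rw [List.getElem?_reverse (by rw [hlen1]; exact hk), hlen1, hL1def]
      rw [List.getElem?_take, List.getElem?_drop]
      rw [if_pos (by omega)]
      congr 1
      omega
    have eq2 : ∀ k : Nat, k < m.toNat → L2[k]? = lines[i.toNat + k]? := by
      intro k hk
      rw [hL2def, List.getElem?_take, List.getElem?_drop]
      rw [if_pos (by omega)]
    have eqa : ∀ k : Nat, k < m.toNat → PySem.List.pyGet? lines (i - 1 - k) = lines[i.toNat - 1 - k]? := by
      intro k hk
      rw [PySem.List.pyGet?_of_nonneg lines (by omega : (0:Int) ≤ i - 1 - k)]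
      congr 1
      omega
    have eqb : ∀ k : Nat, k < m.toNat → PySem.List.pyGet? lines (i + k) = lines[i.toNat + k]? := by
      intro k hk
      rw [PySem.List.pyGet?_of_nonneg lines (by omega : (0:Int) ≤ i + k)]
      congr 1
      omega
    rw [List.ext_getElem?_iff]
    constructor
    · intro H k hk1 hk2
      have hk : k < m.toNat := by omega
      rw [eqa k hk, eqb k hk, ← eq1 k hk, ← eq2 k hk]
      exact H k
    · intro H k
      by_cases hk : k < m.toNat
      · rw [eq1 k hk, eq2 k hk]
        have := H k (by omega) (by omega)
        rw [eqa k hk, eqb k hk] at this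
        exact this
      · rw [List.getElem?_eq_none (by simp [hlen1]; omega),
            List.getElem?_eq_none (by rw [hlen2]; omega)]
  · have hm : max 0 (min i ((lines.length:Int) - i)) = 0 := by omega
    rw [hm]
    simp only [sub_zero, add_zero]
    have hlen : (PySem.List.slice lines (some i) (some i)).length = 0 := by
      rw [PySem.List.length_slice]; omega
    rw [List.eq_nil_of_length_eq_zero hlen]
    simp only [List.reverse_nil, true_iff]
    intro k hk1 hk2
    exfalso
    omega

-- ===== VERDICT (by name: the statement is the Claim_ definition above) =====
theorem one_row_ref_spec : Claim_equal_one_row_ref := by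
  intro lines i _
  unfold Spec_one_row_ref one_row_ref
  have hA := oneRowRefLoop_iff lines (i - 1) i
  have hB := alt_iff lines i
  by_cases h : oneRowRefLoop lines (i - 1) i = true
  · rw [h]
    symm
    rw [hB]
    intro k hk hk2
    have := (hA.mp h) k hk hk2
    simpa [sub_right_comm] using this
  · have h' : oneRowRefLoop lines (i - 1) i = false := by
      cases hb : oneRowRefLoop lines (i - 1) i <;> simp_all
    rw [h']
    symm
    rw [Bool.eq_false_iff]
    intro hbad
    apply h
    rw [hA]
    intro k hk hk2
    have := (hB.mp hbad) k hk hk2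
    simpa [sub_right_comm] using this
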